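-- pv_equiv track=rewrite | github.com/mayank905/codingPractise | 2024_Oct-Dec/Min_XOR.py | minXOR
-- ===== SOURCE A (Python) =====
-- from typing import List
-- import functools
--
-- def minXOR(n : int, k : int, arr : List[int]) -> int:
--     max_number = max(arr)
--     bits_needed = max_number.bit_length()
--     xor_value = functools.reduce(lambda x, y: x ^ y, arr)
--     # binary_representations = [f'{number:0{bits_needed}b}' for number in arr]
--     xor_binary_representation = f'{xor_value:0{bits_needed}b}'
--     length=len(xor_binary_representation)
--     l=0
--     while k!=0 and l!=length-1:
--         if xor_binary_representation[l]=='1':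
--             k-=1
--             xor_binary_representation=xor_binary_representation[0:l]+'0'+xor_binary_representation[l+1:]
--             l+=1
--         else:
--             l+=1
--     if k==0:
--         return int(xor_binary_representation,2)
--     else:
--          return 0
-- ===== SOURCE B (Python) =====
-- from typing import List
-- import functools
--
-- def minXOR(n: int, k: int, arr: List[int]) -> int:
--     xor_value = functools.reduce(lambda a, b: a ^ b, arr)
--     length = max(max(arr).bit_length(), 1)
--     if k == 0:
--         return xor_value
--     set_positions = [p for p in range(length - 1, 0, -1)
--                      if (xor_value // 2 ** p) % 2 == 1]
--     if k < 0 or k > len(set_positions):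
--         return 0
--     result = xor_value
--     for p in set_positions[:k]:
--         result -= 2 ** p
--     return result
-- ===== Notes on version B (the rewrite author's own statement) =====
-- stated objective: alternative
-- what changed: A renders the XOR as a zero-padded binary string and repeatedly rebuilds that string by slicing while scanning it char by char; B never builds a string: it collects the set-bit positions above the LSB from a range comprehension and then arithmetically clears the top k of them.
-- outside the precondition, e.g. on minXOR(0, 1, [-2]): A returns 0, B returns -4; on minXOR(0, 1, []): A raises ValueError, B raises TypeError
import Mathlib
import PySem

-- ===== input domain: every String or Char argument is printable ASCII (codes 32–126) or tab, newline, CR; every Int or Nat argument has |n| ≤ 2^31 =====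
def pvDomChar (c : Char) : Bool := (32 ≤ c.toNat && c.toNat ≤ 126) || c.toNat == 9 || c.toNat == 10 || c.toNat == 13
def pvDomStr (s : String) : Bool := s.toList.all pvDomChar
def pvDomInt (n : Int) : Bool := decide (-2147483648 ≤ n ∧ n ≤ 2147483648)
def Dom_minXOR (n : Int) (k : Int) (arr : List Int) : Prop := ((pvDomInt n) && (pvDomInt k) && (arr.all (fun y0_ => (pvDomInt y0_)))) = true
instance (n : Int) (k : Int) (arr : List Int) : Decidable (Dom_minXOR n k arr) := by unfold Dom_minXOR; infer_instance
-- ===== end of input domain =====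

-- B replaces A's char-by-char string-surgery scan by a two-pass decomposition (collect the
-- set-bit positions above the LSB, then arithmetically clear the top k of them); same values
-- on non-negative input (objective: alternative, no speed claim).

-- ===== PORT A =====

-- int(s, 2): exact here because every string it is applied to in this program is a nonempty
-- sequence of '0'/'1' digit characters (the zero-padded binary rendering and its edits).
def intOfBin (s : List Char) : Int :=
  s.foldl (fun a c => 2 * a + (if c = '1' then 1 else 0)) 0

-- the while loop of A: state = (current string, k, index l); the slice rebuild
-- s[0:l] + '0' + s[l+1:] is take l ++ '0' :: drop (l+1) (l is in range whenever it fires).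
-- Guard 'l < length - 1' = Python's 'l != length-1' on every reachable state (l only steps up by 1 from 0).
def loopA (s : List Char) (k : Int) (l : Nat) : List Char × Int :=
  if h : k ≠ 0 ∧ l < s.length - 1 then
    if PySem.List.pyGet? s (l : Int) = some '1' then
      loopA (s.take l ++ '0' :: s.drop (l + 1)) (k - 1) (l + 1)
    else
      loopA s k (l + 1)
  else (s, k)
termination_by s.length - l
decreasing_by
  · simp only [List.length_append, List.length_take, List.length_cons, List.length_drop]
    omega
  · omega

def minXOR (n : Int) (k : Int) (arr : List Int) : Int :=
  let max_number : Int := (PySem.List.max? arr id).getD 0   -- max(arr); raises on [] → excluded by Pre_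
  let bits_needed : Nat := PySem.Int.bitLength max_number
  let xor_value : Int := match arr with
    | [] => 0                                               -- unreachable: reduce raises on [] (Pre_)
    | h :: t => t.foldl (fun x y => PySem.Int.bxor x y) h
  -- f'{xor_value:0{bits_needed}b}': zero-pad format(xor_value,'b') to width bits_needed;
  -- exact for 0 ≤ xor_value, which Pre_ (all elements ≥ 0) guarantees.
  let xbr : List Char :=
    List.replicate (bits_needed - (PySem.Int.toBinChars xor_value).length) '0' ++
      PySem.Int.toBinChars xor_value
  let r := loopA xbr k 0
  if r.2 = 0 then intOfBin r.1 else 0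

-- ===== PORT B =====

def minXOR_alt (n : Int) (k : Int) (arr : List Int) : Int :=
  let xor_value : Int := match arr with
    | [] => 0                                               -- unreachable: reduce raises on [] (Pre_)
    | h :: t => t.foldl (fun a b => PySem.Int.bxor a b) h
  let length : Int := max ((PySem.Int.bitLength ((PySem.List.max? arr id).getD 0) : Int)) 1
  if k = 0 then xor_value
  else
    let set_positions : List Int :=
      (PySem.List.pyRange (length - 1) 0 (-1)).filter
        (fun p => decide (PySem.Int.mod (PySem.Int.floordiv xor_value ((2:Int) ^ p.toNat)) 2 = 1))
        -- 2 ** p with p ≥ 1 throughout the range: (2:Int) ^ p.toNat is exact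
    if k < 0 ∨ k > PySem.List.len set_positions then 0
    else (PySem.List.slice set_positions none (some k)).foldl
           (fun result p => result - (2:Int) ^ p.toNat) xor_value

-- ===== PRECONDITION & SPEC =====

-- Pre_ excludes the empty list (max/reduce raise ValueError/TypeError there) and lists with a
-- negative element: a negative xor/max makes A's f'{x:0{w}b}' emit a sign character and the
-- subsequent string surgery over it is an accident of that signed rendering, not a bit operation.
def Pre_minXOR (n : Int) (k : Int) (arr : List Int) : Prop :=
  arr ≠ [] ∧ ∀ a ∈ arr, 0 ≤ a
instance (n : Int) (k : Int) (arr : List Int) : Decidable (Pre_minXOR n k arr) := by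
  unfold Pre_minXOR; infer_instance

def pvWitness_minXOR : Int × Int × List Int := (0, 1, [5, 3])

def Spec_minXOR (n : Int) (k : Int) (arr : List Int) (out : Int) : Prop := out = minXOR_alt n k arr
instance (n : Int) (k : Int) (arr : List Int) (out : Int) : Decidable (Spec_minXOR n k arr out) := by
  unfold Spec_minXOR; infer_instance

-- ===== CLAIM (what is proved, stated in full; the proofs are below) =====
def Claim_equal_minXOR : Prop := ∀ (n : Int) (k : Int) (arr : List Int), Dom_minXOR n k arr → Pre_minXOR n k arr → Spec_minXOR n k arr (minXOR n k arr)

-- ===== LEMMAS AND PROOFS =====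

-- value of a binary digit string (Nat side)
def valN (s : List Char) : Nat :=
  s.foldl (fun a c => 2 * a + (if c = '1' then 1 else 0)) 0

-- format(m,'b') for m : Nat, as a clean structural recursion (shape of Nat.toDigitsCore)
def binChars (m : Nat) : List Char :=
  if h : m / 2 = 0 then [Nat.digitChar (m % 2)]
  else binChars (m / 2) ++ [Nat.digitChar (m % 2)]
termination_by m
decreasing_by omega

-- A's scan, structurally: process all chars but the last, left to right
def procA : List Char → Int → List Char × Int
  | [], k => ([], k)
  | [c], k => ([c], k)
  | c :: c' :: s', k =>
    if k = 0 then (c :: c' :: s', k)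
    else if c = '1' then
      let r := procA (c' :: s') (k - 1); ('0' :: r.1, r.2)
    else
      let r := procA (c' :: s') k; (c :: r.1, r.2)

-- B's index list, structurally: set-bit positions above position 0, high to low
def onesPos : List Char → List Int
  | [] => []
  | [_] => []
  | c :: c' :: s' =>
    (if c = '1' then [((c' :: s').length : Int)] else []) ++ onesPos (c' :: s')

lemma toDigitsCore_two_eq (fuel : Nat) :
    ∀ m ds, m < fuel → Nat.toDigitsCore 2 fuel m ds = binChars m ++ ds := by
  induction fuel with
  | zero => intro m ds h; omega
  | succ fuel ih =>
    intro m ds h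
    rw [Nat.toDigitsCore]
    by_cases h2 : m / 2 = 0
    · rw [binChars]; simp [h2]
    · rw [binChars]; simp only [h2, if_false]
      rw [ih (m / 2) _ (by omega)]
      simp

lemma toBinChars_natCast (m : Nat) : PySem.Int.toBinChars (m : Int) = binChars m := by
  rw [PySem.Int.toBinChars]
  rw [if_neg (by omega)]
  rw [Nat.toDigits]
  simp only [Int.toNat_natCast]
  rw [toDigitsCore_two_eq (m+1) m [] (by omega), List.append_nil]

lemma valN_from (s : List Char) : ∀ a : Nat,
    s.foldl (fun a c => 2 * a + (if c = '1' then 1 else 0)) a = a * 2 ^ s.length + valN s := by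
  induction s with
  | nil => intro a; simp [valN]
  | cons c s ih =>
    intro a
    simp only [List.foldl_cons, List.length_cons, valN] at *
    rw [ih, ih (2 * 0 + if c = '1' then 1 else 0)]
    ring

lemma valN_cons (c : Char) (s : List Char) :
    valN (c :: s) = (if c = '1' then 1 else 0) * 2 ^ s.length + valN s := by
  show s.foldl _ _ = _
  rw [valN_from]
  ring_nf

lemma valN_lt (s : List Char) : valN s < 2 ^ s.length := by
  induction s with
  | nil => simp [valN]
  | cons c s ih =>
    rw [valN_cons]
    have h2 : (2:Nat) ^ (c :: s).length = 2 ^ s.length * 2 := by rw [List.length_cons, pow_succ]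
    rw [List.length_cons, pow_succ]
    split <;> omega

lemma valN_binChars (m : Nat) : valN (binChars m) = m := by
  induction m using Nat.strong_induction_on with
  | _ m ih =>
    rw [binChars]
    by_cases h : m / 2 = 0
    · rw [dif_pos h]
      have hm : m = 0 ∨ m = 1 := by omega
      rcases hm with rfl | rfl <;> simp [valN, Nat.digitChar]
    · rw [dif_neg h]
      show (binChars (m/2) ++ [Nat.digitChar (m % 2)]).foldl _ 0 = m
      rw [List.foldl_append]
      show 2 * valN (binChars (m/2)) + _ = m
      rw [ih (m/2) (by omega)]
      have h2 : m % 2 = 0 ∨ m % 2 = 1 := by omega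
      rcases h2 with h2 | h2 <;> rw [h2] <;> simp [Nat.digitChar] <;> omega

lemma valN_replicate_zero_append (p : Nat) (s : List Char) :
    valN (List.replicate p '0' ++ s) = valN s := by
  induction p with
  | zero => simp
  | succ p ih => simpa [List.replicate_succ, valN, List.foldl_cons] using ih

lemma length_binChars (m : Nat) :
    (binChars m).length = if m = 0 then 1 else PySem.Int.bitLength (m : Int) := by
  induction m using Nat.strong_induction_on with
  | _ m ih =>
    rw [binChars]
    by_cases h : m / 2 = 0
    · rw [dif_pos h]
      have hm : m = 0 ∨ m = 1 := by omega
      rcases hm with rfl | rfl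
      · simp
      · rw [if_neg one_ne_zero]
        rw [show ((1:Nat):Int) = ((1:Nat):Int) from rfl, PySem.Int.bitLength_natCast (by omega)]
        simp [PySem.Int.bitLength_zero]
    · rw [dif_neg h]
      rw [List.length_append, ih (m/2) (by omega), if_neg h, if_neg (by omega : ¬ m = 0)]
      rw [PySem.Int.bitLength_natCast (m := m) (by omega)]
      simp

lemma bitLength_le_of_lt {m w : Nat} (h : m < 2 ^ w) : PySem.Int.bitLength (m : Int) ≤ w := by
  induction m using Nat.strong_induction_on generalizing w with
  | _ m ih =>
    by_cases hm : m = 0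
    · subst hm; simp [PySem.Int.bitLength_zero]
    · have hw : w ≠ 0 := by
        rintro rfl; simp at h; omega
      rw [PySem.Int.bitLength_natCast (by omega)]
      have hlt : m / 2 < 2 ^ (w - 1) := by
        rw [Nat.div_lt_iff_lt_mul (by omega)]
        calc m < 2 ^ w := h
        _ = 2 ^ (w-1) * 2 := by rw [← pow_succ]; congr 1; omega
      have := ih (m/2) (by omega) hlt
      omega

lemma intOfBin_eq_valN (s : List Char) : intOfBin s = (valN s : Int) := by
  have key : ∀ (t : List Char) (a : Nat),
      t.foldl (fun a c => 2 * a + (if c = '1' then 1 else 0)) ((a : Nat) : Int)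
        = ((t.foldl (fun a c => 2 * a + (if c = '1' then 1 else 0)) a : Nat) : Int) := by
    intro t
    induction t with
    | nil => intro a; rfl
    | cons c t ih =>
      intro a
      simp only [List.foldl_cons]
      rw [show (2 * ((a:Nat):Int) + (if c = '1' then 1 else 0))
            = ((2 * a + (if c = '1' then 1 else 0) : Nat) : Int) by push_cast [apply_ite]; ring_nf; split <;> ring]
      exact ih _
  simpa using key s 0

lemma foldl_max_mem {f : Option Int → Int → Option Int}
    (h1 : ∀ x, f none x = some x)
    (h2 : ∀ mm x, f (some mm) x = some x ∨ f (some mm) x = some mm) :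
    ∀ (t : List Int) (acc : Option Int) {m : Int}, t.foldl f acc = some m → acc = some m ∨ m ∈ t := by
  intro t
  induction t with
  | nil => intro acc m h; exact Or.inl h
  | cons x t ih =>
    intro acc m h
    simp only [List.foldl_cons] at h
    rcases ih _ h with hh | hh
    · cases acc with
      | none => rw [h1] at hh; right; simp at hh; simp [hh]
      | some mm =>
        rcases h2 mm x with he | he <;> rw [he] at hh
        · right; simp at hh; simp [hh]
        · left; exact hh
    · right; simp [hh]

lemma foldl_max_isSome {f : Option Int → Int → Option Int}
    (h2 : ∀ mm x, ∃ r, f (some mm) x = some r) :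
    ∀ (t : List Int) (a : Int), ∃ m, t.foldl f (some a) = some m := by
  intro t
  induction t with
  | nil => intro a; exact ⟨a, rfl⟩
  | cons x t ih =>
    intro a
    simp only [List.foldl_cons]
    obtain ⟨r, hr⟩ := h2 a x
    rw [hr]
    exact ih r

lemma max?_mem {xs : List Int} {m : Int} (h : PySem.List.max? xs id = some m) : m ∈ xs := by
  rw [PySem.List.max?] at h
  have key := foldl_max_mem ?_ ?_ xs none h
  case _ =>
    rcases key with hh | hh
    · cases hh
    · exact hh
  case _ => intro x; rfl
  case _ =>
    intro mm x
    show (if id mm < id x then some x else some mm) = _ ∨ (if id mm < id x then some x else some mm) = _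
    split
    · exact Or.inl rfl
    · exact Or.inr rfl

lemma max?_isSome {xs : List Int} (h : xs ≠ []) : ∃ m, PySem.List.max? xs id = some m := by
  cases xs with
  | nil => exact absurd rfl h
  | cons x t =>
    rw [PySem.List.max?]
    simp only [List.foldl_cons]
    show ∃ m, List.foldl _ (some x) t = some m
    refine foldl_max_isSome ?_ t x
    intro mm y
    show ∃ r, (if id mm < id y then some y else some mm) = some r
    split
    · exact ⟨y, rfl⟩
    · exact ⟨mm, rfl⟩

lemma fold_bxor_bound {w : Nat} : ∀ (t : List Int) (a : Nat), a < 2 ^ w →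
    (∀ y ∈ t, 0 ≤ y ∧ y.toNat < 2 ^ w) →
    ∃ r : Nat, t.foldl (fun x y => PySem.Int.bxor x y) (a : Int) = (r : Int) ∧ r < 2 ^ w := by
  intro t
  induction t with
  | nil => intro a ha _; exact ⟨a, rfl, ha⟩
  | cons y t ih =>
    intro a ha hall
    obtain ⟨hy0, hylt⟩ := hall y (by simp)
    simp only [List.foldl_cons]
    rw [show (y : Int) = ((y.toNat : Nat) : Int) by rw [Int.toNat_of_nonneg hy0]]
    rw [PySem.Int.bxor_natCast]
    exact ih _ (Nat.xor_lt_two_pow ha hylt) (fun z hz => hall z (by simp [hz]))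

lemma loopA_eq (rest : List Char) : ∀ (pre : List Char) (k : Int),
    loopA (pre ++ rest) k pre.length = ((pre ++ (procA rest k).1, (procA rest k).2)) := by
  induction rest with
  | nil =>
    intro pre k
    rw [loopA]
    rw [dif_neg (by simp)]
    simp [procA]
  | cons c tail ih =>
    intro pre k
    cases tail with
    | nil =>
      rw [loopA]
      rw [dif_neg (by simp)]
      simp [procA]
    | cons c' s' =>
      rw [loopA]
      by_cases hk : k = 0
      · rw [dif_neg (by simp [hk])]
        simp [procA, hk]
      · rw [dif_pos ⟨hk, by simp⟩]
        have hget : PySem.List.pyGet? (pre ++ c :: c' :: s') ((pre.length : Nat) : Int) = some c :=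
          PySem.List.pyGet?_append_length pre (c' :: s') c
        rw [hget]
        by_cases hc : c = '1'
        · subst hc
          rw [if_pos rfl]
          have hsplice : (pre ++ '1' :: c' :: s').take pre.length ++ '0' :: (pre ++ '1' :: c' :: s').drop (pre.length + 1)
              = (pre ++ ['0']) ++ c' :: s' := by
            rw [List.take_left]
            rw [show pre ++ '1' :: c' :: s' = (pre ++ ['1']) ++ c' :: s' by simp]
            rw [show pre.length + 1 = (pre ++ ['1']).length by simp]
            rw [List.drop_left]
            simp
          rw [hsplice]
          rw [show pre.length + 1 = (pre ++ ['0']).length by simp]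
          rw [ih (pre ++ ['0']) (k - 1)]
          simp [procA, hk]
        · rw [if_neg (by simp [hc])]
          rw [show pre ++ c :: c' :: s' = (pre ++ [c]) ++ c' :: s' by simp]
          rw [show pre.length + 1 = (pre ++ [c]).length by simp]
          rw [ih (pre ++ [c]) k]
          simp [procA, hk, hc]

lemma bit_div_lemma (b v n : Nat) (hb : b ≤ 1) (hv : v < 2 ^ n) :
    (b * 2 ^ n + v) / 2 ^ n % 2 = b := by
  rw [Nat.add_comm, Nat.add_mul_div_right _ _ (Nat.two_pow_pos n)]
  rw [Nat.div_eq_of_lt hv]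
  omega

lemma bit_div_lower (b v n q : Nat) (hq : q < n) :
    (b * 2 ^ n + v) / 2 ^ q % 2 = v / 2 ^ q % 2 := by
  have h1 : b * 2 ^ n = b * 2 ^ (n - q - 1) * 2 * 2 ^ q := by
    rw [mul_assoc, mul_assoc, ← pow_succ']
    congr 2
    rw [← pow_add]
    congr 1
    omega
  rw [Nat.add_comm, h1, Nat.add_mul_div_right _ _ (Nat.two_pow_pos q)]
  rw [Nat.add_mul_mod_self_right]

lemma posList_eq (s : List Char) (hs : s ≠ []) :
    (PySem.List.pyRange ((s.length : Int) - 1) 0 (-1)).filter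
        (fun p => decide (PySem.Int.mod (PySem.Int.floordiv ((valN s : Int)) ((2:Int) ^ p.toNat)) 2 = 1))
      = onesPos s := by
  induction s with
  | nil => exact absurd rfl hs
  | cons c tail ih =>
    cases tail with
    | nil =>
      rw [show ((([c] : List Char).length : Int) - 1) = 0 by simp]
      rw [PySem.List.pyRange_neg_one_eq_nil (le_refl 0)]
      rfl
    | cons c' s' =>
      have hlen : (((c :: c' :: s').length : Int) - 1) = ((c' :: s').length : Int) := by
        simp
      rw [hlen]
      rw [PySem.List.pyRange_neg_one_cons (by simp)]
      rw [List.filter_cons]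
      have hb : (if c = '1' then 1 else 0) ≤ 1 := by split <;> omega
      have hhead : (decide (PySem.Int.mod (PySem.Int.floordiv ((valN (c :: c' :: s') : Int))
          ((2:Int) ^ ((((c' :: s').length : Nat) : Int)).toNat)) 2 = 1)) = decide (c = '1') := by
        rw [Int.toNat_natCast]
        rw [show ((2:Int) ^ (c' :: s').length) = (((2 ^ (c' :: s').length : Nat) : Int)) by push_cast; ring]
        rw [PySem.Int.floordiv_natCast]
        rw [show ((2:Int)) = (((2:Nat) : Int)) by norm_num]
        rw [PySem.Int.mod_natCast]
        rw [valN_cons]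
        rw [bit_div_lemma _ _ _ hb (valN_lt _)]
        by_cases hc : c = '1'
        · simp [hc]
        · simp [hc]
      have htail : (PySem.List.pyRange (((c' :: s').length : Int) - 1) 0 (-1)).filter
          (fun p => decide (PySem.Int.mod (PySem.Int.floordiv ((valN (c :: c' :: s') : Int)) ((2:Int) ^ p.toNat)) 2 = 1))
          = (PySem.List.pyRange (((c' :: s').length : Int) - 1) 0 (-1)).filter
          (fun p => decide (PySem.Int.mod (PySem.Int.floordiv ((valN (c' :: s') : Int)) ((2:Int) ^ p.toNat)) 2 = 1)) := by
        apply List.filter_congr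
        intro p hp
        rw [PySem.List.mem_pyRange_neg_one] at hp
        obtain ⟨hp1, hp2⟩ := hp
        have hq : p = ((p.toNat : Nat) : Int) := by omega
        have hqlt : p.toNat < (c' :: s').length := by omega
        rw [show ((2:Int) ^ p.toNat) = (((2 ^ p.toNat : Nat) : Int)) by push_cast; ring]
        rw [PySem.Int.floordiv_natCast, PySem.Int.floordiv_natCast]
        rw [show ((2:Int)) = (((2:Nat) : Int)) by norm_num]
        rw [PySem.Int.mod_natCast, PySem.Int.mod_natCast]
        rw [valN_cons]
        rw [bit_div_lower _ _ _ _ hqlt]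
      rw [htail, ih (by simp)]
      rw [hhead]
      by_cases hc : c = '1'
      · simp [onesPos, hc]
      · simp [onesPos, hc]

lemma valN_cons_not_one {c : Char} (s : List Char) (hc : ¬ c = '1') : valN (c :: s) = valN s := by
  rw [valN_cons, if_neg hc]; ring

lemma valN_cons_one (s : List Char) : valN ('1' :: s) = 2 ^ s.length + valN s := by
  rw [valN_cons, if_pos rfl]; ring

lemma main_lemma (s : List Char) (hs : s ≠ []) (k : Int) :
    (if (procA s k).2 = 0 then ((valN (procA s k).1 : Nat) : Int) else 0)
      = (if k = 0 then ((valN s : Nat) : Int)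
         else if k < 0 ∨ k > ((onesPos s).length : Int) then 0
         else ((onesPos s).take k.toNat).foldl (fun r p => r - (2:Int) ^ p.toNat) ((valN s : Nat) : Int)) := by
  induction s generalizing k with
  | nil => exact absurd rfl hs
  | cons c tail ih =>
    cases tail with
    | nil =>
      by_cases hk : k = 0
      · simp [procA, hk]
      · simp only [procA, onesPos, List.length_nil, Nat.cast_zero, if_neg hk]
        rw [if_pos (by omega)]
    | cons c' s' =>
      by_cases hk : k = 0
      · simp [procA, hk]
      · have hIH := ih (by simp)
        rw [if_neg hk]
        by_cases hc : c = '1'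
        · subst hc
          simp only [procA, if_neg hk, if_true]
          rw [valN_cons_not_one _ (by decide : ¬ ('0' : Char) = '1')]
          rw [hIH (k - 1)]
          rw [valN_cons_one]
          have honesPos : onesPos ('1' :: c' :: s') = (((c' :: s').length : Int)) :: onesPos (c' :: s') := by
            simp [onesPos]
          rw [honesPos]
          set m := (c' :: s').length with hm
          set v' := valN (c' :: s') with hv'
          set P' := onesPos (c' :: s') with hP'
          set n' := P'.length with hn'
          rw [show ((((m : Int) :: P').length : Int)) = (n' : Int) + 1 by simp [hn']]
          by_cases h1 : k < 0 ∨ k > (n' : Int) + 1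
          · rw [if_pos h1, if_neg (by omega), if_pos (by omega)]
          · rw [if_neg h1]
            have htake : ((m : Int) :: P').take k.toNat = (m : Int) :: P'.take (k.toNat - 1) := by
              conv_lhs => rw [show k.toNat = (k.toNat - 1) + 1 by omega]
              rw [List.take_succ_cons]
            rw [htake, List.foldl_cons]
            have hstep : ((((2:Nat) ^ m + v' : Nat) : Int)) - (2:Int) ^ ((m : Int)).toNat = (v' : Int) := by
              rw [Int.toNat_natCast]; push_cast; ring
            rw [hstep]
            by_cases h2 : k = 1
            · subst h2
              rw [if_pos (by omega)]
              simp
            · rw [if_neg (by omega), if_neg (by omega)]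
              rw [show (k - 1).toNat = k.toNat - 1 by omega]
        · simp only [procA, if_neg hk, if_neg hc]
          rw [valN_cons_not_one _ hc, valN_cons_not_one _ hc]
          rw [hIH k]
          have honesPos : onesPos (c :: c' :: s') = onesPos (c' :: s') := by
            simp [onesPos, hc]
          rw [honesPos]
          rw [if_neg hk]

-- ===== VERDICT (by name: the statement is the Claim_ definition above) =====
theorem minXOR_spec : Claim_equal_minXOR := by
  intro n k arr _hdom hpre
  obtain ⟨hne, hnn⟩ := hpre
  unfold Spec_minXOR
  cases arr with
  | nil => exact absurd rfl hne
  | cons h t =>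
    obtain ⟨m, hm⟩ := max?_isSome (xs := h :: t) (by simp)
    have hmem := max?_mem hm
    have hm0 : 0 ≤ m := hnn m hmem
    have hmax : ∀ a ∈ h :: t, a ≤ m := fun a ha => PySem.List.max?_isMax hm a ha
    set w := PySem.Int.bitLength m with hw
    have hmlt : m.toNat < 2 ^ w := by
      have h1 : m.natAbs < 2 ^ w := hw ▸ PySem.Int.lt_two_pow_bitLength m
      omega
    have hbound : ∀ y ∈ t, 0 ≤ y ∧ y.toNat < 2 ^ w := by
      intro y hy
      have h0 := hnn y (by simp [hy])
      have h1 : y ≤ m := hmax y (by simp [hy])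
      exact ⟨h0, by omega⟩
    have hh0 : 0 ≤ h := hnn h (by simp)
    have hhlt : h.toNat < 2 ^ w := by
      have h1 : h ≤ m := hmax h (by simp)
      omega
    obtain ⟨xn, hxn, hxnlt⟩ := fold_bxor_bound t h.toNat hhlt hbound
    rw [Int.toNat_of_nonneg hh0] at hxn
    -- the padded binary string and its facts
    set s : List Char :=
      List.replicate (w - (binChars xn).length) '0' ++ binChars xn with hsdef
    have hvalNs : valN s = xn := by
      rw [hsdef, valN_replicate_zero_append, valN_binChars]
    have hlens : s.length = max w 1 := by
      rw [hsdef, List.length_append, List.length_replicate, length_binChars]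
      by_cases hz : xn = 0
      · rw [if_pos hz]; omega
      · rw [if_neg hz]
        have h1 : 1 ≤ PySem.Int.bitLength (xn : Int) := by
          rw [PySem.Int.bitLength_natCast (by omega)]; omega
        have h2 : PySem.Int.bitLength (xn : Int) ≤ w := bitLength_le_of_lt hxnlt
        omega
    have hsne : s ≠ [] := by
      intro hcon
      have := congrArg List.length hcon
      rw [hlens] at this
      simp at this
    -- unfold both ports
    simp only [minXOR, minXOR_alt]
    rw [hm]
    simp only [Option.getD_some]
    simp only [hxn]
    rw [toBinChars_natCast]
    rw [← hw, ← hsdef]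
    -- A side: the while loop is procA
    have hloop : loopA s k 0 = ((procA s k).1, (procA s k).2) := by
      have := loopA_eq s [] k
      simpa using this
    rw [hloop]
    simp only [intOfBin_eq_valN]
    -- B side: the filtered range is onesPos
    have hmaxcast : max ((w : Int)) 1 = ((s.length : Nat) : Int) := by
      rw [hlens]; push_cast; rfl
    rw [hmaxcast]
    rw [show ((xn : Nat) : Int) = ((valN s : Nat) : Int) by rw [hvalNs]]
    rw [posList_eq s hsne]
    rw [main_lemma s hsne k]
    -- both sides now branch identically
    by_cases hk : k = 0
    · rw [if_pos hk, if_pos hk]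
    · rw [if_neg hk, if_neg hk]
      rw [PySem.List.len_eq]
      by_cases hg : k < 0 ∨ k > ((onesPos s).length : Int)
      · rw [if_pos hg, if_pos hg]
      · rw [if_neg hg, if_neg hg]
        rw [PySem.List.slice_to (onesPos s) (b := k) (by omega)]
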